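-- pv_equiv track=rewrite | github.com/jqb1/advent-of-code | 2023/day_13/13.py | check_and_fix
-- ===== SOURCE A (Python) =====
-- def check_and_fix(first_p, second_p, pattern, fix_cnt):
--     if first_p < 0 or second_p >= len(pattern):
--         if fix_cnt == 1:
--             return True
--         return False
--     if fix_cnt > 1:
--         return False
--     if pattern[first_p] == pattern[second_p]:
--         return check_and_fix(first_p - 1, second_p + 1, pattern, fix_cnt)
--     elif len(set(enumerate(pattern[first_p])) - set(enumerate(pattern[second_p]))) == 1:
--         return check_and_fix(first_p - 1, second_p + 1, pattern, fix_cnt + 1)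
--     else:
--         return False
-- ===== SOURCE B (Python) =====
-- def _row_code(r1, r2):
--     if r1 == r2:
--         return 0
--     if sum(1 for i, ch in enumerate(r1) if i >= len(r2) or r2[i] != ch) == 1:
--         return 1
--     return 2
--
-- def check_and_fix(first_p, second_p, pattern, fix_cnt):
--     codes = []
--     while first_p >= 0 and second_p < len(pattern):
--         codes.append(_row_code(pattern[first_p], pattern[second_p]))
--         first_p -= 1
--         second_p += 1
--     return 2 not in codes and fix_cnt + sum(codes) == 1
-- ===== Notes on version B (the rewrite author's own statement) =====
-- stated objective: alternative
-- what changed: Replaced A's early-exit recursion threading a fix counter by a staged computation: one loop classifies each mirrored row pair into a code list (0 equal, 1 one-character smudge counted directly instead of A's enumerate-set subtraction, 2 incompatible), then a closed aggregate '2 not in codes and fix_cnt + sum(codes) == 1' gives the answer.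
-- outside the precondition, e.g. on check_and_fix(3, 1, ['a', 'b'], 2): A returns False, B raises IndexError
import Mathlib
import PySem

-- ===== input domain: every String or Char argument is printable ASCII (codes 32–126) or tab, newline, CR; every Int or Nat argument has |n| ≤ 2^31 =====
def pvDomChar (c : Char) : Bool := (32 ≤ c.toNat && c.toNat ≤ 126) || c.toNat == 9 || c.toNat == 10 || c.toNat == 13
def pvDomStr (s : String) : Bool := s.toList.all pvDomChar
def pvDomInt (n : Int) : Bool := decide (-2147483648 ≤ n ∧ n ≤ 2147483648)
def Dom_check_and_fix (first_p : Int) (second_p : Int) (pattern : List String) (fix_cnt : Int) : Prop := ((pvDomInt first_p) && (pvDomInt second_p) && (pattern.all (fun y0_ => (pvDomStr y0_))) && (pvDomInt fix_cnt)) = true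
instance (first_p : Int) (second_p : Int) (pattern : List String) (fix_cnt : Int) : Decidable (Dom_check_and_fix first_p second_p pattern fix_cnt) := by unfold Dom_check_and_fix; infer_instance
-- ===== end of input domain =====

-- B stages the computation: a loop classifies each mirrored row pair into a code (0 equal,
-- 1 one-smudge, 2 incompatible) and a closed aggregate over the code list replaces A's
-- early-exit recursion threading a fix counter (objective: alternative decomposition).

-- ===== PORT A =====
def check_and_fix (first_p : Int) (second_p : Int) (pattern : List String) (fix_cnt : Int) : Bool :=
  if h : first_p < 0 ∨ (pattern.length : Int) ≤ second_p then
    -- if fix_cnt == 1: return True / return False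
    fix_cnt == 1
  else if 1 < fix_cnt then false
  else
    -- pattern[first_p] / pattern[second_p]: pyGet? is none exactly where Python raises IndexError;
    -- those inputs are excluded by Pre_, the .getD "" default is never reached under Pre_.
    let r1 := (PySem.List.pyGet? pattern first_p).getD ""
    let r2 := (PySem.List.pyGet? pattern second_p).getD ""
    if r1 == r2 then check_and_fix (first_p - 1) (second_p + 1) pattern fix_cnt
    else if PySem.Set.len (PySem.Set.diff (PySem.Set.ofList (PySem.List.enumerate r1.toList))
        (PySem.Set.ofList (PySem.List.enumerate r2.toList))) == 1 then
      check_and_fix (first_p - 1) (second_p + 1) pattern (fix_cnt + 1)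
    else false
termination_by ((pattern.length : Int) - second_p).toNat
decreasing_by all_goals (rw [not_or] at h; omega)

-- ===== PORT B =====
-- _row_code(r1, r2): 0 rows equal, 1 exactly-one-position smudge, 2 incompatible
def pvRowCode (r1 r2 : String) : Int :=
  if r1 == r2 then 0
  else if (PySem.List.enumerate r1.toList).countP
      (fun p => decide ((r2.toList.length : Int) ≤ p.1) || (PySem.List.pyGet? r2.toList p.1 != some p.2)) == 1 then 1
  else 2

-- the while loop building `codes` (pattern[...] excluded from failing by Pre_, as in port A)
def pvCodes (first_p : Int) (second_p : Int) (pattern : List String) : List Int :=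
  if h : 0 ≤ first_p ∧ second_p < (pattern.length : Int) then
    pvRowCode ((PySem.List.pyGet? pattern first_p).getD "") ((PySem.List.pyGet? pattern second_p).getD "")
      :: pvCodes (first_p - 1) (second_p + 1) pattern
  else []
termination_by ((pattern.length : Int) - second_p).toNat
decreasing_by all_goals omega

def check_and_fix_alt (first_p : Int) (second_p : Int) (pattern : List String) (fix_cnt : Int) : Bool :=
  let codes := pvCodes first_p second_p pattern
  -- return 2 not in codes and fix_cnt + sum(codes) == 1
  !codes.contains 2 && (fix_cnt + codes.sum == 1)

-- ===== PRECONDITION & SPEC =====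
-- Pre_ excludes the inputs whose mirrored indices point outside the pattern (first_p >= len with
-- second_p < len, or second_p < -len): there Python A either raises IndexError (fix_cnt <= 1) or
-- returns False only because its fix-count guard fires before the out-of-range access, while B's
-- staged classification always performs the access and raises; A returns normally everywhere else.
def Pre_check_and_fix (first_p : Int) (second_p : Int) (pattern : List String) (fix_cnt : Int) : Prop :=
  ¬ (0 ≤ first_p ∧ second_p < (pattern.length : Int) ∧
      ((pattern.length : Int) ≤ first_p ∨ second_p < -(pattern.length : Int)))
instance (first_p : Int) (second_p : Int) (pattern : List String) (fix_cnt : Int) : Decidable (Pre_check_and_fix first_p second_p pattern fix_cnt) := by unfold Pre_check_and_fix; infer_instance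

def pvWitness_check_and_fix : Int × Int × List String × Int := (1, 2, ["#.#", "#.#", "..#", "..#"], 0)

def Spec_check_and_fix (first_p : Int) (second_p : Int) (pattern : List String) (fix_cnt : Int) (out : Bool) : Prop := out = check_and_fix_alt first_p second_p pattern fix_cnt
instance (first_p : Int) (second_p : Int) (pattern : List String) (fix_cnt : Int) (out : Bool) : Decidable (Spec_check_and_fix first_p second_p pattern fix_cnt out) := by unfold Spec_check_and_fix; infer_instance

-- ===== CLAIM (what is proved, stated in full; the proofs are below) =====
def Claim_equal_check_and_fix : Prop := ∀ (first_p : Int) (second_p : Int) (pattern : List String) (fix_cnt : Int), Dom_check_and_fix first_p second_p pattern fix_cnt → Pre_check_and_fix first_p second_p pattern fix_cnt → Spec_check_and_fix first_p second_p pattern fix_cnt (check_and_fix first_p second_p pattern fix_cnt)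

-- ===== LEMMAS AND PROOFS =====

lemma nodup_enumerate (l : List Char) : (PySem.List.enumerate l).Nodup := by
  exact (PySem.List.pairwise_lt_enumerate l 0).imp (fun h => by
    intro he; rw [he] at h; exact lt_irrefl _ h)

-- membership in enumerate, phrased through pyGet? (the indexing B performs)
lemma mem_enumerate_iff_pyGet (l : List Char) (i : Int) (c : Char) (hi : 0 ≤ i) :
    ((i, c) ∈ PySem.List.enumerate l) ↔ PySem.List.pyGet? l i = some c := by
  rw [PySem.List.mem_enumerate_iff, PySem.List.pyGet?_of_nonneg l hi]
  constructor
  · rintro ⟨k, hk, hp⟩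
    obtain ⟨h1, h2⟩ := Prod.mk.injEq .. ▸ hp
    simp only [zero_add] at h1
    subst h2
    have hik : i.toNat = k := by omega
    simp [hik, hk]
  · intro hg
    have hlt : i.toNat < l.length := by
      by_contra hn
      rw [List.getElem?_eq_none (by omega)] at hg
      simp at hg
    refine ⟨i.toNat, hlt, ?_⟩
    rw [List.getElem?_eq_getElem hlt, Option.some_inj] at hg
    rw [Prod.ext_iff]
    exact ⟨by omega, hg.symm⟩

-- A's |set(enumerate(r1)) - set(enumerate(r2))| equals B's direct mismatch count
lemma diff_len_eq_countP (l1 l2 : List Char) :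
    PySem.Set.len (PySem.Set.diff (PySem.Set.ofList (PySem.List.enumerate l1))
        (PySem.Set.ofList (PySem.List.enumerate l2)))
      = ((PySem.List.enumerate l1).countP
          (fun p => decide ((l2.length : Int) <= p.1) || (PySem.List.pyGet? l2 p.1 != some p.2)) : Int) := by
  rw [PySem.Set.ofList_eq_self_of_nodup _ (nodup_enumerate l1),
      PySem.Set.ofList_eq_self_of_nodup _ (nodup_enumerate l2)]
  unfold PySem.Set.len PySem.Set.diff
  rw [List.countP_eq_length_filter]
  have hcong : List.filter (fun x => !PySem.Set.contains (PySem.List.enumerate l2) x)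
        (PySem.List.enumerate l1)
      = List.filter (fun p => decide ((l2.length : Int) <= p.1) || (PySem.List.pyGet? l2 p.1 != some p.2))
        (PySem.List.enumerate l1) := by
    apply List.filter_congr
    intro p hp
    obtain ⟨i, c⟩ := p
    have hi : 0 ≤ i := by
      rw [PySem.List.mem_enumerate_iff] at hp
      obtain ⟨k, _, hpk⟩ := hp
      obtain ⟨h1, _⟩ := Prod.mk.injEq .. ▸ hpk
      omega
    have hcc : PySem.Set.contains (PySem.List.enumerate l2) (i, c)
        = decide ((i, c) ∈ PySem.List.enumerate l2) := by simp [PySem.Set.contains]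
    rw [hcc]
    by_cases hm : PySem.List.pyGet? l2 i = some c
    · have hmem : (i, c) ∈ PySem.List.enumerate l2 := (mem_enumerate_iff_pyGet l2 i c hi).mpr hm
      have hlen : i < (l2.length : Int) := by
        rw [PySem.List.mem_enumerate_iff] at hmem
        obtain ⟨k, hk, hpk⟩ := hmem
        obtain ⟨h1, _⟩ := Prod.mk.injEq .. ▸ hpk
        omega
      simp [hmem, hm, not_le.mpr hlen]
    · have hmem : (i, c) ∉ PySem.List.enumerate l2 :=
        fun hx => hm ((mem_enumerate_iff_pyGet l2 i c hi).mp hx)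
      simp [hmem, hm]
  rw [hcong]

-- every code is one of 0, 1, 2, so the code list's sum is nonnegative
lemma pvRowCode_nonneg (r1 r2 : String) : 0 ≤ pvRowCode r1 r2 := by
  unfold pvRowCode; split_ifs <;> norm_num

lemma pvCodes_sum_nonneg (first_p second_p : Int) (pattern : List String) :
    0 ≤ (pvCodes first_p second_p pattern).sum := by
  rw [pvCodes]
  split_ifs with h
  · have := pvCodes_sum_nonneg (first_p - 1) (second_p + 1) pattern
    have := pvRowCode_nonneg ((PySem.List.pyGet? pattern first_p).getD "")
        ((PySem.List.pyGet? pattern second_p).getD "")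
    simp only [List.sum_cons]
    omega
  · simp
termination_by ((pattern.length : Int) - second_p).toNat
decreasing_by all_goals omega

-- A equals B's aggregate over the code list, by induction on the loop measure
lemma agree_aux (n : Nat) : ∀ (first_p second_p : Int) (pattern : List String) (fix_cnt : Int),
    ((pattern.length : Int) - second_p).toNat ≤ n →
    check_and_fix first_p second_p pattern fix_cnt
      = (!(pvCodes first_p second_p pattern).contains 2
          && (fix_cnt + (pvCodes first_p second_p pattern).sum == 1)) := by
  induction n with
  | zero =>
    intro fp sp pat fc h
    have hsp : (pat.length : Int) ≤ sp := by omega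
    rw [check_and_fix, dif_pos (Or.inr hsp), pvCodes, dif_neg (by omega)]
    simp
  | succ n ih =>
    intro fp sp pat fc h
    rw [check_and_fix, pvCodes]
    by_cases hguard : fp < 0 ∨ (pat.length : Int) ≤ sp
    · rw [dif_pos hguard, dif_neg (by omega)]
      simp
    · rw [not_or, not_lt, not_le] at hguard
      rw [dif_neg (by omega), dif_pos (by omega)]
      set r1 := (PySem.List.pyGet? pat fp).getD "" with hr1
      set r2 := (PySem.List.pyGet? pat sp).getD "" with hr2
      have hsum : 0 ≤ (pvCodes (fp - 1) (sp + 1) pat).sum := pvCodes_sum_nonneg _ _ _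
      have hcode : 0 ≤ pvRowCode r1 r2 := pvRowCode_nonneg r1 r2
      have hd := diff_len_eq_countP r1.toList r2.toList
      simp only [String.length_toList] at hd
      by_cases hfc : 1 < fc
      · -- A returns False; B's aggregate is False since fix_cnt + sum stays above 1
        rw [if_pos hfc]
        by_cases hc2 : (pvRowCode r1 r2 :: pvCodes (fp - 1) (sp + 1) pat).contains 2 = true
        · rw [hc2]; simp
        · rw [Bool.not_eq_true] at hc2
          have hne : (fc + (pvRowCode r1 r2 :: pvCodes (fp - 1) (sp + 1) pat).sum == 1) = false := by
            rw [beq_eq_false_iff_ne]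
            simp only [List.sum_cons]
            omega
          rw [hc2, hne]
          simp
      · rw [if_neg hfc]
        by_cases he : r1 = r2
        · have hc : pvRowCode r1 r2 = 0 := by simp [pvRowCode, he]
          rw [if_pos (by simp [he]), ih _ _ _ _ (by omega), hc]
          simp
        · rw [if_neg (by simpa using he)]
          by_cases h1 : (PySem.List.enumerate r1.toList).countP
              (fun p => decide ((r2.length : Int) ≤ p.1)
                || (PySem.List.pyGet? r2.toList p.1 != some p.2)) = 1
          · have hc : pvRowCode r1 r2 = 1 := by simp [pvRowCode, he, h1]
            have hA : (PySem.Set.len (PySem.Set.diff (PySem.Set.ofList (PySem.List.enumerate r1.toList))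
                (PySem.Set.ofList (PySem.List.enumerate r2.toList))) == 1) = true := by
              rw [hd]; simp [h1]
            rw [if_pos hA, ih _ _ _ _ (by omega), hc]
            have harith : fc + (1 + (pvCodes (fp - 1) (sp + 1) pat).sum)
                = fc + 1 + (pvCodes (fp - 1) (sp + 1) pat).sum := by ring
            simp [harith]
          · have hc : pvRowCode r1 r2 = 2 := by simp [pvRowCode, he, h1]
            have hA : ¬ ((PySem.Set.len (PySem.Set.diff (PySem.Set.ofList (PySem.List.enumerate r1.toList))
                (PySem.Set.ofList (PySem.List.enumerate r2.toList))) == 1) = true) := by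
              rw [hd]
              simp only [beq_iff_eq]
              exact_mod_cast h1
            rw [if_neg hA, hc]
            simp

-- ===== VERDICT (by name: the statement is the Claim_ definition above) =====
theorem check_and_fix_spec : Claim_equal_check_and_fix := by
  intro fp sp pat fc _ _
  unfold Spec_check_and_fix check_and_fix_alt
  exact agree_aux ((pat.length : Int) - sp).toNat fp sp pat fc le_rfl
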